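-- pv_equiv track=rewrite | github.com/coding-test-practice/kimtaewon-python | 1/section2/10/10-gpt.py | calc
-- ===== SOURCE A (Python) =====
-- def calc(data):
--     score = 0
--     cnt = 0
--     # 개선 1: 조건 더 간단하게 (combo는 필요없음)
--     for d in data:
--         if d == 1:
--             cnt += 1
--             score += cnt
--         else:
--             cnt = 0
--     return score
-- ===== SOURCE B (Python) =====
-- def calc(data):
--     score = 0
--     i = 0
--     n = len(data)
--     while i < n:
--         if data[i] == 1:
--             j = i
--             while j < n and data[j] == 1:
--                 j += 1
--             L = j - i
--             score += L * (L + 1) // 2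
--             i = j
--         else:
--             i += 1
--     return score
-- ===== Notes on version B (the rewrite author's own statement) =====
-- stated objective: alternative
-- what changed: Replaces the per-element running counter with a run-detection scan: each maximal run of 1s of length L contributes the closed-form triangular number L*(L+1)//2 in one step.
import Mathlib
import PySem

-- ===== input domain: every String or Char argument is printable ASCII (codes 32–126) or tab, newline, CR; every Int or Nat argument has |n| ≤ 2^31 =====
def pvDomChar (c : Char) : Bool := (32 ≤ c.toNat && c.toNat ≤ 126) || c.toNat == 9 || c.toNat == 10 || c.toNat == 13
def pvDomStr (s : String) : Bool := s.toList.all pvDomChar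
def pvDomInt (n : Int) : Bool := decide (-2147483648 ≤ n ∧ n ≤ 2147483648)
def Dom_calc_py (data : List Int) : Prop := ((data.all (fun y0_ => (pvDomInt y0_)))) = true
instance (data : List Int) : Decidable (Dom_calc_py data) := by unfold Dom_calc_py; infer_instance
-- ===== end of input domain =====

-- B replaces A's per-element running counter with a run-detection scan adding a
-- closed-form triangular number per maximal run of 1s (alternative decomposition, same cost).

-- ===== PORT A =====
-- A's for-loop over data carrying (score, cnt)
def calcGoA : List Int → Int → Int → Int
  | [], score, _ => score
  | d :: rest, score, cnt =>
    if d = 1 then calcGoA rest (score + (cnt + 1)) (cnt + 1)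
    else calcGoA rest score 0

def calc_py (data : List Int) : Int := calcGoA data 0 0

-- ===== PORT B =====
-- B's outer while-loop: at a 1 it scans the whole run (takeWhile/dropWhile mirror the
-- inner 'while j < n and data[j] == 1' scan), adds L*(L+1)//2, and resumes after the run.
def calcGoB : List Int → Int
  | [] => 0
  | d :: rest =>
    if d = 1 then
      let L : Int := 1 + (rest.takeWhile (fun x => x = 1)).length
      PySem.Int.floordiv (L * (L + 1)) 2 + calcGoB (rest.dropWhile (fun x => x = 1))
    else calcGoB rest
termination_by l => l.length
decreasing_by
  · simp
    exact List.length_dropWhile_le _ _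
  · simp

def calc_py_alt (data : List Int) : Int := calcGoB data

-- ===== PRECONDITION & SPEC =====
def Spec_calc_py (data : List Int) (out : Int) : Prop := out = calc_py_alt data
instance (data : List Int) (out : Int) : Decidable (Spec_calc_py data out) := by unfold Spec_calc_py; infer_instance

-- ===== CLAIM (what is proved, stated in full; the proofs are below) =====
def Claim_equal_calc_py : Prop := ∀ (data : List Int), Dom_calc_py data → Spec_calc_py data (calc_py data)

-- ===== LEMMAS AND PROOFS =====

-- triangular numbers, recursively
def pvTri : Nat → Int
  | 0 => 0
  | k + 1 => pvTri k + (k + 1)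

theorem pvTri_closed (k : Nat) : PySem.Int.floordiv ((k : Int) * ((k : Int) + 1)) 2 = pvTri k := by
  induction k with
  | zero => decide
  | succ k ih =>
    rw [PySem.Int.floordiv_eq_ediv_of_pos (by omega)] at *
    have h : ((k + 1 : Nat) : Int) * (((k + 1 : Nat) : Int) + 1)
        = (k : Int) * ((k : Int) + 1) + ((k : Int) + 1) * 2 := by push_cast; ring
    rw [h, Int.add_mul_ediv_right _ _ (by omega : (2:Int) ≠ 0), ih]
    simp [pvTri]

-- A's loop over a run of k ones
theorem calcGoA_ones (k : Nat) (rest : List Int) (score cnt : Int) :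
    calcGoA (List.replicate k 1 ++ rest) score cnt
      = calcGoA rest (score + (k : Int) * cnt + pvTri k) (cnt + k) := by
  induction k generalizing score cnt with
  | zero => simp [pvTri]
  | succ k ih =>
    simp only [List.replicate_succ, List.cons_append, calcGoA]
    rw [ih]
    have h1 : score + (cnt + 1) + (k : Int) * (cnt + 1) + pvTri k
        = score + ((k + 1 : Nat) : Int) * cnt + pvTri (k + 1) := by
      simp [pvTri]; ring
    have h2 : cnt + 1 + (k : Int) = cnt + ((k + 1 : Nat) : Int) := by push_cast; ring
    rw [h1, h2]
    simp

theorem takeWhile_ones_eq_replicate (l : List Int) :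
    l.takeWhile (fun x => x = 1) = List.replicate (l.takeWhile (fun x => x = 1)).length 1 := by
  apply List.eq_replicate_of_mem
  intro b hb
  have := List.mem_takeWhile_imp hb
  simpa using this

theorem calcGoA_eq (n : Nat) : ∀ (data : List Int), data.length ≤ n →
    ∀ score : Int, calcGoA data score 0 = score + calcGoB data := by
  induction n with
  | zero =>
    intro data h score
    have : data = [] := List.eq_nil_of_length_eq_zero (Nat.le_zero.mp h)
    subst this; simp [calcGoA, calcGoB]
  | succ n ih =>
    intro data h score
    match data with
    | [] => simp [calcGoA, calcGoB]
    | d :: rest =>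
      by_cases hd : d = 1
      · subst hd
        have hrepl := takeWhile_ones_eq_replicate rest
        have hsplit : rest = rest.takeWhile (fun x => x = 1) ++ rest.dropWhile (fun x => x = 1) :=
          (List.takeWhile_append_dropWhile).symm
        have hlenr : rest.length ≤ n := by simp at h; omega
        set k := (rest.takeWhile (fun x => x = 1)).length with hk
        have hrun : (1 : Int) :: rest
            = List.replicate (k + 1) 1 ++ rest.dropWhile (fun x => x = 1) := by
          rw [List.replicate_succ, List.cons_append, ← hrepl]
          exact congrArg _ hsplit
        have htri : PySem.Int.floordiv ((1 + (k : Int)) * (1 + (k : Int) + 1)) 2 = pvTri (k + 1) := by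
          have hc : (1 + (k : Int)) * (1 + (k : Int) + 1)
              = ((k + 1 : Nat) : Int) * (((k + 1 : Nat) : Int) + 1) := by push_cast; ring
          rw [hc, pvTri_closed]
        have hdlen : (rest.dropWhile (fun x => x = 1)).length ≤ n := by
          have := List.length_dropWhile_le (fun x => decide (x = 1)) rest
          omega
        rw [calcGoB]
        simp only [← hk]
        conv_lhs => rw [hrun, calcGoA_ones]
        rcases hdw : rest.dropWhile (fun x => x = 1) with _ | ⟨e, tail⟩
        · rw [hdw] at *
          simp [calcGoA, calcGoB]
          rw [← htri, PySem.Int.floordiv_eq_ediv_of_pos (by omega)]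
        · have he : ¬ (e = 1) := by
            have hhead := List.head?_dropWhile_not (p := fun x => decide (x = 1)) (l := rest)
            rw [hdw] at hhead
            simpa using hhead
          rw [hdw] at hdlen ⊢
          rw [calcGoA, if_neg he, calcGoB, if_neg he]
          have htail : tail.length ≤ n := by simp at hdlen; omega
          rw [ih tail htail, htri]
          simp
          ring
      · rw [calcGoA, if_neg hd, calcGoB, if_neg hd]
        exact ih rest (by simp at h; omega) score

-- ===== VERDICT (by name: the statement is the Claim_ definition above) =====
theorem calc_py_spec : Claim_equal_calc_py := by
  intro data _
  unfold Spec_calc_py calc_py calc_py_alt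
  simpa using calcGoA_eq data.length data le_rfl 0
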